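-- pv_equiv track=rewrite | github.com/aegeavaz/trailvideocut | src/trailvideocut/plate/projection.py | _pick_samples
-- ===== SOURCE A (Python) =====
-- def _pick_samples(
--     frames: list[int],
--     current_frame: int,
-- ) -> tuple[int, int] | None:
--     """Pick (older, newer) reference frames in preference order.
--
--     1. Two closest prior detections.
--     2. One prior + one next (closest on each side).
--     3. Two closest next detections.
--     """
--     priors = [f for f in frames if f < current_frame]
--     nexts = [f for f in frames if f > current_frame]
--
--     if len(priors) >= 2:
--         # Closest two priors, ordered older → newer.
--         p_sorted = sorted(priors, reverse=True)[:2]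
--         return (p_sorted[1], p_sorted[0])
--     if priors and nexts:
--         return (max(priors), min(nexts))
--     if len(nexts) >= 2:
--         n_sorted = sorted(nexts)[:2]
--         return (n_sorted[0], n_sorted[1])
--     return None
-- ===== SOURCE B (Python) =====
-- def _pick_samples(
--     frames: list[int],
--     current_frame: int,
-- ):
--     """Single pass: track the two largest values below current_frame and the
--     two smallest above it, then apply the same three-tier preference."""
--     p1 = p2 = None  # largest / second-largest prior
--     n1 = n2 = None  # smallest / second-smallest next
--     pc = nc = 0
--     for f in frames:
--         if f < current_frame:
--             pc += 1
--             if p1 is None or f >= p1: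
--                 p1, p2 = f, p1
--             elif p2 is None or f > p2:
--                 p2 = f
--         elif f > current_frame:
--             nc += 1
--             if n1 is None or f <= n1:
--                 n1, n2 = f, n1
--             elif n2 is None or f < n2:
--                 n2 = f
--     if pc >= 2:
--         return (p2, p1)
--     if pc >= 1 and nc >= 1:
--         return (p1, n1)
--     if nc >= 2:
--         return (n1, n2)
--     return None
-- ===== Notes on version B (the rewrite author's own statement) =====
-- stated objective: alternative
-- what changed: Replaces A's filter-into-two-lists plus sort/max/min selection by a single pass over frames that maintains running trackers for the two largest values below current_frame and the two smallest above it, with counts; no intermediate lists or sorting.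
import Mathlib
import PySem

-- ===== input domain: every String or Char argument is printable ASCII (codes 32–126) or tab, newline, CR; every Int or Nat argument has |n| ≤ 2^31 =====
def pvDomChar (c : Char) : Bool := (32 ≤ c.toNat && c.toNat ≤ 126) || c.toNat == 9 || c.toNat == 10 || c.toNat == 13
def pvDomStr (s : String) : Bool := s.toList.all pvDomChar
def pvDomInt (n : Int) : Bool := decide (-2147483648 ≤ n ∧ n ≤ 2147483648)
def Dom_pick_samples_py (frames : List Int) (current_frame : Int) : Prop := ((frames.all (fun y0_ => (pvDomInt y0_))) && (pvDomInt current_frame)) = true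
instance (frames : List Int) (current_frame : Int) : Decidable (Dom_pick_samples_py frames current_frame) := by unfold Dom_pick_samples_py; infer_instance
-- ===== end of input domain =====

-- B replaces A's filter-then-sort selection by a single pass that tracks the two
-- largest values below current_frame and the two smallest above it (objective: alternative).


-- ===== PORT A =====
-- priors = [f for f in frames if f < current_frame]; nexts = [f for f in frames if f > current_frame];
-- then the three-tier preference using sorted / max / min, exactly as in A.
def pick_samples_py (frames : List Int) (current_frame : Int) : Option (Int × Int) :=
  let priors := frames.filter (fun f => decide (f < current_frame))
  let nexts := frames.filter (fun f => decide (current_frame < f))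
  if 2 ≤ priors.length then
    -- p_sorted = sorted(priors, reverse=True)[:2]; return (p_sorted[1], p_sorted[0])
    match PySem.List.sorted priors (fun x => x) true with
    | p0 :: p1 :: _ => some (p1, p0)
    | _ => none  -- unreachable: len(priors) >= 2
  else if priors ≠ [] ∧ nexts ≠ [] then
    match PySem.List.max? priors (fun x => x), PySem.List.min? nexts (fun x => x) with
    | some a, some b => some (a, b)
    | _, _ => none  -- unreachable: both nonempty
  else if 2 ≤ nexts.length then
    match PySem.List.sorted nexts (fun x => x) false with
    | n0 :: n1 :: _ => some (n0, n1)
    | _ => none  -- unreachable: len(nexts) >= 2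
  else none

-- ===== PORT B =====
-- B's loop body for a frame f < current_frame: update (p1, p2, pc).
def pvPStep (st : Option Int × Option Int × Nat) (f : Int) : Option Int × Option Int × Nat :=
  match st with
  | (p1, p2, pc) =>
    match p1 with
    | none => (some f, none, pc + 1)                        -- p1 is None: p1, p2 = f, p1
    | some a =>
      if a ≤ f then (some f, some a, pc + 1)                -- f >= p1: p1, p2 = f, p1
      else
        match p2 with
        | none => (some a, some f, pc + 1)                  -- p2 is None: p2 = f
        | some b => if b < f then (some a, some f, pc + 1)  -- f > p2: p2 = f
                    else (some a, some b, pc + 1)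

-- B's loop body for a frame f > current_frame: update (n1, n2, nc).
def pvNStep (st : Option Int × Option Int × Nat) (f : Int) : Option Int × Option Int × Nat :=
  match st with
  | (n1, n2, nc) =>
    match n1 with
    | none => (some f, none, nc + 1)
    | some a =>
      if f ≤ a then (some f, some a, nc + 1)
      else
        match n2 with
        | none => (some a, some f, nc + 1)
        | some b => if f < b then (some a, some f, nc + 1)
                    else (some a, some b, nc + 1)

-- B's loop body: dispatch on f < / > / = current_frame.
def pvStep (c : Int) (st : (Option Int × Option Int × Nat) × (Option Int × Option Int × Nat))
    (f : Int) : (Option Int × Option Int × Nat) × (Option Int × Option Int × Nat) :=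
  if f < c then (pvPStep st.1 f, st.2)
  else if c < f then (st.1, pvNStep st.2 f)
  else st

def pick_samples_py_alt (frames : List Int) (current_frame : Int) : Option (Int × Int) :=
  match frames.foldl (pvStep current_frame) ((none, none, 0), (none, none, 0)) with
  | ((p1, p2, pc), (n1, n2, nc)) =>
    if 2 ≤ pc then
      match p2 with
      | some b => (match p1 with | some a => some (b, a) | none => none)
      | none => none  -- unreachable: pc >= 2
    else if 1 ≤ pc ∧ 1 ≤ nc then
      match p1 with
      | some a => (match n1 with | some b => some (a, b) | none => none)
      | none => none  -- unreachable: pc, nc >= 1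
    else if 2 ≤ nc then
      match n1 with
      | some a => (match n2 with | some b => some (a, b) | none => none)
      | none => none  -- unreachable: nc >= 2
    else none

-- ===== PRECONDITION & SPEC =====
def Spec_pick_samples_py (frames : List Int) (current_frame : Int) (out : Option (Int × Int)) : Prop := out = pick_samples_py_alt frames current_frame
instance (frames : List Int) (current_frame : Int) (out : Option (Int × Int)) : Decidable (Spec_pick_samples_py frames current_frame out) := by unfold Spec_pick_samples_py; infer_instance

-- ===== CLAIM (what is proved, stated in full; the proofs are below) =====
def Claim_equal_pick_samples_py : Prop := ∀ (frames : List Int) (current_frame : Int), Dom_pick_samples_py frames current_frame → Spec_pick_samples_py frames current_frame (pick_samples_py frames current_frame)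

-- ===== LEMMAS AND PROOFS =====

-- What B's p-tracker computes over a list: (largest, largest-after-removing-one-max, length).
def pvPTop (l : List Int) : Option Int × Option Int × Nat :=
  match PySem.List.max? l (fun x => x) with
  | none => (none, none, 0)
  | some m => (some m, PySem.List.max? (l.erase m) (fun x => x), l.length)

-- Dual for the n-tracker.
def pvNTop (l : List Int) : Option Int × Option Int × Nat :=
  match PySem.List.min? l (fun x => x) with
  | none => (none, none, 0)
  | some m => (some m, PySem.List.min? (l.erase m) (fun x => x), l.length)

lemma pv_max?_eq (l : List Int) (m : Int) (hm : m ∈ l) (hmax : ∀ y ∈ l, y ≤ m) :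
    PySem.List.max? l (fun x => x) = some m := by
  cases h : PySem.List.max? l (fun x => x) with
  | none => rw [PySem.List.max?_eq_none_iff] at h; subst h; simp at hm
  | some m' =>
    have h1 := PySem.List.max?_mem h
    have h2 := PySem.List.max?_isMax h
    have : m' = m := le_antisymm (hmax m' h1) (h2 m hm)
    rw [this]

lemma pv_min?_eq (l : List Int) (m : Int) (hm : m ∈ l) (hmin : ∀ y ∈ l, m ≤ y) :
    PySem.List.min? l (fun x => x) = some m := by
  cases h : PySem.List.min? l (fun x => x) with
  | none => rw [PySem.List.min?_eq_none_iff] at h; subst h; simp at hm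
  | some m' =>
    have h1 := PySem.List.min?_mem h
    have h2 := PySem.List.min?_isMin h
    have : m' = m := le_antisymm (h2 m hm) (hmin m' h1)
    rw [this]

-- Splitting the single fold over frames into the two filtered folds.
lemma pv_fold_split (c : Int) (frames : List Int) (sp sn : Option Int × Option Int × Nat) :
    frames.foldl (pvStep c) (sp, sn)
      = ((frames.filter (fun f => decide (f < c))).foldl pvPStep sp,
         (frames.filter (fun f => decide (c < f))).foldl pvNStep sn) := by
  induction frames generalizing sp sn with
  | nil => rfl
  | cons x t ih =>
    simp only [List.foldl_cons, List.filter_cons]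
    by_cases h1 : x < c
    · have h2 : ¬ c < x := by omega
      simp [pvStep, h1, h2, ih]
    · by_cases h2 : c < x
      · simp [pvStep, h1, h2, ih]
      · simp [pvStep, h1, h2, ih]

-- The p-tracker computes pvPTop.
lemma pv_pfold (l : List Int) : l.foldl pvPStep (none, none, 0) = pvPTop l := by
  induction l using List.reverseRecOn with
  | nil => rfl
  | append_singleton t x ih =>
    rw [List.foldl_append, ih]
    cases h : PySem.List.max? t (fun y => y) with
    | none =>
      rw [PySem.List.max?_eq_none_iff] at h; subst h
      simp [pvPTop, pvPStep, PySem.List.max?]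
    | some m =>
      have hmem := PySem.List.max?_mem h
      have hmax := PySem.List.max?_isMax h
      have hne : t ≠ [] := by rintro rfl; simp at hmem
      by_cases hx : m ≤ x
      · -- new maximum is x
        have hhead : PySem.List.max? (t ++ [x]) (fun y => y) = some x := by
          apply pv_max?_eq
          · simp
          · intro y hy; rcases List.mem_append.mp hy with hy | hy
            · exact le_trans (hmax y hy) hx
            · simp at hy; omega
        by_cases hxt : x ∈ t
        · have hxm : x = m := le_antisymm (hmax x hxt) hx
          subst hxm
          have herase : (t ++ [x]).erase x = t.erase x ++ [x] :=
            List.erase_append_left _ hxt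
          have hsecond : PySem.List.max? ((t ++ [x]).erase x) (fun y => y) = some x := by
            rw [herase]; apply pv_max?_eq
            · simp
            · intro y hy; rcases List.mem_append.mp hy with hy | hy
              · exact hmax y (List.mem_of_mem_erase hy)
              · simp at hy; omega
          simp [pvPTop, hhead, hsecond, pvPStep, h]
        · have herase : (t ++ [x]).erase x = t :=  by
            rw [List.erase_append_right _ hxt]; simp
          simp [pvPTop, hhead, herase, h, pvPStep, hx]
      · -- maximum stays m
        have hhead : PySem.List.max? (t ++ [x]) (fun y => y) = some m := by
          apply pv_max?_eq
          · exact List.mem_append.mpr (Or.inl hmem)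
          · intro y hy; rcases List.mem_append.mp hy with hy | hy
            · exact hmax y hy
            · simp at hy; omega
        have herase : (t ++ [x]).erase m = t.erase m ++ [x] :=
          List.erase_append_left _ hmem
        cases h2 : PySem.List.max? (t.erase m) (fun y => y) with
        | none =>
          rw [PySem.List.max?_eq_none_iff] at h2
          have hsecond : PySem.List.max? ((t ++ [x]).erase m) (fun y => y) = some x := by
            rw [herase, h2]; apply pv_max?_eq <;> simp
          simp [pvPTop, hhead, hsecond, h, h2, pvPStep, hx]
          rfl
        | some b =>
          have hbmem := PySem.List.max?_mem h2
          have hbmax := PySem.List.max?_isMax h2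
          by_cases hbx : b < x
          · have hsecond : PySem.List.max? ((t ++ [x]).erase m) (fun y => y) = some x := by
              rw [herase]; apply pv_max?_eq
              · simp
              · intro y hy; rcases List.mem_append.mp hy with hy | hy
                · have := hbmax y hy; omega
                · simp at hy; omega
            simp [pvPTop, hhead, hsecond, h, h2, pvPStep, hx, hbx]
          · have hsecond : PySem.List.max? ((t ++ [x]).erase m) (fun y => y) = some b := by
              rw [herase]; apply pv_max?_eq
              · exact List.mem_append.mpr (Or.inl hbmem)
              · intro y hy; rcases List.mem_append.mp hy with hy | hy
                · exact hbmax y hy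
                · simp at hy; omega
            simp [pvPTop, hhead, hsecond, h, h2, pvPStep, hx, hbx]

-- The n-tracker computes pvNTop (dual proof).
lemma pv_nfold (l : List Int) : l.foldl pvNStep (none, none, 0) = pvNTop l := by
  induction l using List.reverseRecOn with
  | nil => rfl
  | append_singleton t x ih =>
    rw [List.foldl_append, ih]
    cases h : PySem.List.min? t (fun y => y) with
    | none =>
      rw [PySem.List.min?_eq_none_iff] at h; subst h
      simp [pvNTop, pvNStep, PySem.List.min?]
    | some m =>
      have hmem := PySem.List.min?_mem h
      have hmin := PySem.List.min?_isMin h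
      have hne : t ≠ [] := by rintro rfl; simp at hmem
      by_cases hx : x ≤ m
      · have hhead : PySem.List.min? (t ++ [x]) (fun y => y) = some x := by
          apply pv_min?_eq
          · simp
          · intro y hy; rcases List.mem_append.mp hy with hy | hy
            · exact le_trans hx (hmin y hy)
            · simp at hy; omega
        by_cases hxt : x ∈ t
        · have hxm : x = m := le_antisymm hx (hmin x hxt)
          subst hxm
          have herase : (t ++ [x]).erase x = t.erase x ++ [x] :=
            List.erase_append_left _ hxt
          have hsecond : PySem.List.min? ((t ++ [x]).erase x) (fun y => y) = some x := by
            rw [herase]; apply pv_min?_eq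
            · simp
            · intro y hy; rcases List.mem_append.mp hy with hy | hy
              · exact hmin y (List.mem_of_mem_erase hy)
              · simp at hy; omega
          simp [pvNTop, hhead, hsecond, pvNStep, h]
        · have herase : (t ++ [x]).erase x = t := by
            rw [List.erase_append_right _ hxt]; simp
          simp [pvNTop, hhead, herase, h, pvNStep, hx]
      · have hhead : PySem.List.min? (t ++ [x]) (fun y => y) = some m := by
          apply pv_min?_eq
          · exact List.mem_append.mpr (Or.inl hmem)
          · intro y hy; rcases List.mem_append.mp hy with hy | hy
            · exact hmin y hy
            · simp at hy; omega
        have herase : (t ++ [x]).erase m = t.erase m ++ [x] :=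
          List.erase_append_left _ hmem
        cases h2 : PySem.List.min? (t.erase m) (fun y => y) with
        | none =>
          rw [PySem.List.min?_eq_none_iff] at h2
          have hsecond : PySem.List.min? ((t ++ [x]).erase m) (fun y => y) = some x := by
            rw [herase, h2]; apply pv_min?_eq <;> simp
          simp [pvNTop, hhead, hsecond, h, h2, pvNStep, hx]
          rfl
        | some b =>
          have hbmem := PySem.List.min?_mem h2
          have hbmin := PySem.List.min?_isMin h2
          by_cases hbx : x < b
          · have hsecond : PySem.List.min? ((t ++ [x]).erase m) (fun y => y) = some x := by
              rw [herase]; apply pv_min?_eq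
              · simp
              · intro y hy; rcases List.mem_append.mp hy with hy | hy
                · have := hbmin y hy; omega
                · simp at hy; omega
            simp [pvNTop, hhead, hsecond, h, h2, pvNStep, hx, hbx]
          · have hsecond : PySem.List.min? ((t ++ [x]).erase m) (fun y => y) = some b := by
              rw [herase]; apply pv_min?_eq
              · exact List.mem_append.mpr (Or.inl hbmem)
              · intro y hy; rcases List.mem_append.mp hy with hy | hy
                · exact hbmin y hy
                · simp at hy; omega
            simp [pvNTop, hhead, hsecond, h, h2, pvNStep, hx, hbx]

-- Head of the descending sort is the maximum.
lemma pv_head_sorted_rev (l : List Int) (a : Int) (s : List Int)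
    (h : PySem.List.sorted l (fun x => x) true = a :: s) :
    PySem.List.max? l (fun x => x) = some a := by
  apply pv_max?_eq
  · have := (PySem.List.sorted_perm l (fun x => x) true).mem_iff (a := a)
    rw [h] at this; exact this.mp List.mem_cons_self
  · exact PySem.List.key_head_sorted_rev_ge l (fun x => x) h

-- Tail of the descending sort sorts the list with one maximum removed.
lemma pv_tail_sorted_rev (l : List Int) (a : Int) (s : List Int)
    (h : PySem.List.sorted l (fun x => x) true = a :: s) :
    PySem.List.sorted (l.erase a) (fun x => x) true = s := by
  have ha : a ∈ l := by
    have := (PySem.List.sorted_perm l (fun x => x) true).mem_iff (a := a)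
    rw [h] at this; exact this.mp List.mem_cons_self
  have hperm1 : (a :: s).Perm l := by rw [← h]; exact PySem.List.sorted_perm l _ true
  have hperm2 : s.Perm (l.erase a) :=
    ((hperm1.trans (List.perm_cons_erase ha))).cons_inv
  apply PySem.List.eq_of_perm_of_pairwise_le_of_injective (key := fun x : Int => -x)
    (fun x y hxy => by simpa using hxy)
  · exact (PySem.List.sorted_perm (l.erase a) _ true).trans hperm2.symm
  · exact (PySem.List.sorted_pairwise_rev (l.erase a) (fun x => x)).imp (by intro x y; omega)
  · have := PySem.List.sorted_pairwise_rev l (fun x => x)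
    rw [h] at this
    exact (List.pairwise_cons.mp this).2.imp (by intro x y; omega)

-- Head of the ascending sort is the minimum.
lemma pv_head_sorted (l : List Int) (a : Int) (s : List Int)
    (h : PySem.List.sorted l (fun x => x) false = a :: s) :
    PySem.List.min? l (fun x => x) = some a := by
  apply pv_min?_eq
  · have := (PySem.List.sorted_perm l (fun x => x) false).mem_iff (a := a)
    rw [h] at this; exact this.mp List.mem_cons_self
  · exact PySem.List.key_head_sorted_le l (fun x => x) h

-- Tail of the ascending sort sorts the list with one minimum removed.
lemma pv_tail_sorted (l : List Int) (a : Int) (s : List Int)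
    (h : PySem.List.sorted l (fun x => x) false = a :: s) :
    PySem.List.sorted (l.erase a) (fun x => x) false = s := by
  have ha : a ∈ l := by
    have := (PySem.List.sorted_perm l (fun x => x) false).mem_iff (a := a)
    rw [h] at this; exact this.mp List.mem_cons_self
  have hperm1 : (a :: s).Perm l := by rw [← h]; exact PySem.List.sorted_perm l _ false
  have hperm2 : s.Perm (l.erase a) :=
    ((hperm1.trans (List.perm_cons_erase ha))).cons_inv
  apply PySem.List.eq_of_perm_of_pairwise_le_of_injective (key := fun x : Int => x)
    (fun x y hxy => hxy)
  · exact (PySem.List.sorted_perm (l.erase a) _ false).trans hperm2.symm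
  · exact PySem.List.sorted_pairwise (l.erase a) (fun x => x)
  · have := PySem.List.sorted_pairwise l (fun x => x)
    rw [h] at this
    exact (List.pairwise_cons.mp this).2

-- ===== VERDICT (by name: the statement is the Claim_ definition above) =====
theorem pick_samples_py_spec : Claim_equal_pick_samples_py := by
  intro frames c _
  unfold Spec_pick_samples_py pick_samples_py pick_samples_py_alt
  rw [pv_fold_split, pv_pfold, pv_nfold]
  set priors := frames.filter (fun f => decide (f < c)) with hpr
  set nexts := frames.filter (fun f => decide (c < f)) with hnx
  by_cases hp2 : 2 ≤ priors.length
  · -- branch 1: two priors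
    have hpne : priors ≠ [] := by intro h; rw [h] at hp2; simp at hp2
    cases hm : PySem.List.max? priors (fun x => x) with
    | none => rw [PySem.List.max?_eq_none_iff] at hm; exact absurd hm hpne
    | some m =>
      have hel : (priors.erase m).length = priors.length - 1 :=
        List.length_erase_of_mem (PySem.List.max?_mem hm)
      cases hm2 : PySem.List.max? (priors.erase m) (fun x => x) with
      | none =>
        rw [PySem.List.max?_eq_none_iff] at hm2
        rw [hm2] at hel; simp at hel; omega
      | some b =>
        -- analyse A's sorted list
        have hlen : (PySem.List.sorted priors (fun x => x) true).length = priors.length :=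
          PySem.List.length_sorted priors _ true
        cases hs : PySem.List.sorted priors (fun x => x) true with
        | nil => rw [hs] at hlen; simp at hlen; omega
        | cons a0 s0 =>
          cases s0 with
          | nil => rw [hs] at hlen; simp at hlen; omega
          | cons a1 s1 =>
            have h0 : PySem.List.max? priors (fun x => x) = some a0 :=
              pv_head_sorted_rev priors a0 _ hs
            have ha0 : a0 = m := by rw [h0] at hm; exact Option.some.inj hm
            have htail := pv_tail_sorted_rev priors a0 _ hs
            have h1 : PySem.List.max? (priors.erase a0) (fun x => x) = some a1 :=
              pv_head_sorted_rev _ a1 _ htail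
            have ha1 : a1 = b := by
              rw [ha0] at h1; rw [h1] at hm2; exact Option.some.inj hm2
            simp [pvPTop, hm, hm2, hp2, hs, ha0, ha1]
  · by_cases hpn : priors ≠ [] ∧ nexts ≠ []
    · -- branch 2: one prior + one next
      cases hm : PySem.List.max? priors (fun x => x) with
      | none => rw [PySem.List.max?_eq_none_iff] at hm; exact absurd hm hpn.1
      | some a =>
        cases hn : PySem.List.min? nexts (fun x => x) with
        | none => rw [PySem.List.min?_eq_none_iff] at hn; exact absurd hn hpn.2
        | some b =>
          have hplen : 1 ≤ priors.length := List.length_pos_iff.mpr hpn.1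
          have hnlen : 1 ≤ nexts.length := List.length_pos_iff.mpr hpn.2
          cases hnn : PySem.List.min? (nexts.erase b) (fun x => x) <;>
            simp [pvPTop, pvNTop, hm, hn, hnn, hp2, hpn, hplen, hnlen]
    · by_cases hn2 : 2 ≤ nexts.length
      · -- branch 3: two nexts
        have hnne : nexts ≠ [] := by intro h; rw [h] at hn2; simp at hn2
        have hpe : priors = [] := by
          by_contra hne; exact hpn ⟨hne, hnne⟩
        cases hn : PySem.List.min? nexts (fun x => x) with
        | none => rw [PySem.List.min?_eq_none_iff] at hn; exact absurd hn hnne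
        | some m =>
          have hel : (nexts.erase m).length = nexts.length - 1 :=
            List.length_erase_of_mem (PySem.List.min?_mem hn)
          cases hm2 : PySem.List.min? (nexts.erase m) (fun x => x) with
          | none =>
            rw [PySem.List.min?_eq_none_iff] at hm2
            rw [hm2] at hel; simp at hel; omega
          | some b =>
            have hlen : (PySem.List.sorted nexts (fun x => x) false).length = nexts.length :=
              PySem.List.length_sorted nexts _ false
            cases hs : PySem.List.sorted nexts (fun x => x) false with
            | nil => rw [hs] at hlen; simp at hlen; omega
            | cons a0 s0 =>
              cases s0 with
              | nil => rw [hs] at hlen; simp at hlen; omega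
              | cons a1 s1 =>
                have h0 : PySem.List.min? nexts (fun x => x) = some a0 :=
                  pv_head_sorted nexts a0 _ hs
                have ha0 : a0 = m := by rw [h0] at hn; exact Option.some.inj hn
                have htail := pv_tail_sorted nexts a0 _ hs
                have h1 : PySem.List.min? (nexts.erase a0) (fun x => x) = some a1 :=
                  pv_head_sorted _ a1 _ htail
                have ha1 : a1 = b := by
                  rw [ha0] at h1; rw [h1] at hm2; exact Option.some.inj hm2
                simp [pvPTop, pvNTop, hn, hm2, hpe, hn2, hs, ha0, ha1]
                rfl
      · -- branch 4: none
        have hpe : priors = [] ∨ nexts = [] := by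
          by_contra h; rw [not_or] at h; exact hpn ⟨h.1, h.2⟩
        have hkey : ¬ (1 ≤ priors.length ∧ 1 ≤ nexts.length) := by
          rcases hpe with h | h <;> rw [h] <;> simp
        cases hm : PySem.List.max? priors (fun x => x) <;>
          cases hn : PySem.List.min? nexts (fun x => x) <;>
          simp [pvPTop, pvNTop, hm, hn, hp2, hpn, hn2, hkey]
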